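-- pv_equiv track=rewrite | github.com/MArucd/test_verba | wb_test_parser.py | basket_host_by_nm_id
-- ===== SOURCE A (Python) =====
-- VOL_HOST_BREAKPOINTS: list[tuple[int, str]] = [
--     (143, "01"),
--     (287, "02"),
--     (431, "03"),
--     (719, "04"),
--     (1007, "05"),
--     (1061, "06"),
--     (1115, "07"),
--     (1169, "08"),
--     (1313, "09"),
--     (1601, "10"),
--     (1655, "11"),
--     (1919, "12"),
--     (2045, "13"),
--     (2189, "14"),
--     (2405, "15"),
--     (2621, "16"),
--     (2837, "17"),
--     (3053, "18"),
--     (3269, "19"),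
--     (3485, "20"),
--     (3701, "21"),
--     (3917, "22"),
--     (4133, "23"),
--     (4349, "24"),
--     (4565, "25"),
--     (4877, "26"),
--     (5189, "27"),
--     (5501, "28"),
--     (5813, "29"),
--     (6125, "30"),
--     (6437, "31"),
--     (6749, "32"),
--     (7061, "33"),
--     (7373, "34"),
--     (7685, "35"),
--     (7997, "36"),
--     (8309, "37"),
--     (8741, "38"),
--     (9173, "39"),
--     (9605, "40"),
-- ]
--
-- def basket_host_by_nm_id(nm_id: int) -> str:
--     """Build `basket-XX.wbbasket.ru/volN` host according to WB mapping."""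
--     vol = nm_id // 100000
--     shard = "41"
--     for upper_bound, bucket in VOL_HOST_BREAKPOINTS:
--         if vol <= upper_bound:
--             shard = bucket
--             break
--     return f"basket-{shard}.wbbasket.ru/vol{vol}"
-- ===== SOURCE B (Python) =====
-- # B: binary search (bisect_left by hand) over the sorted upper-bound table instead of a linear scan.
-- _BOUNDS = [143, 287, 431, 719, 1007, 1061, 1115, 1169, 1313, 1601, 1655, 1919, 2045, 2189, 2405, 2621, 2837, 3053, 3269, 3485, 3701, 3917, 4133, 4349, 4565, 4877, 5189, 5501, 5813, 6125, 6437, 6749, 7061, 7373, 7685, 7997, 8309, 8741, 9173, 9605]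
-- _SHARDS = ['01', '02', '03', '04', '05', '06', '07', '08', '09', '10', '11', '12', '13', '14', '15', '16', '17', '18', '19', '20', '21', '22', '23', '24', '25', '26', '27', '28', '29', '30', '31', '32', '33', '34', '35', '36', '37', '38', '39', '40']
--
-- def basket_host_by_nm_id(nm_id: int) -> str:
--     vol = nm_id // 100000
--     lo, hi = 0, len(_BOUNDS)
--     while lo < hi:
--         mid = (lo + hi) // 2
--         if _BOUNDS[mid] < vol:
--             lo = mid + 1
--         else:
--             hi = mid
--     shard = _SHARDS[lo] if lo < len(_BOUNDS) else "41"
--     return f"basket-{shard}.wbbasket.ru/vol{vol}"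
-- ===== Notes on version B (the rewrite author's own statement) =====
-- stated objective: faster
-- what changed: Replaced the linear early-break scan over the 40 breakpoint pairs with a hand-written bisect_left binary search over a precomputed sorted bounds list.
import Mathlib
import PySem

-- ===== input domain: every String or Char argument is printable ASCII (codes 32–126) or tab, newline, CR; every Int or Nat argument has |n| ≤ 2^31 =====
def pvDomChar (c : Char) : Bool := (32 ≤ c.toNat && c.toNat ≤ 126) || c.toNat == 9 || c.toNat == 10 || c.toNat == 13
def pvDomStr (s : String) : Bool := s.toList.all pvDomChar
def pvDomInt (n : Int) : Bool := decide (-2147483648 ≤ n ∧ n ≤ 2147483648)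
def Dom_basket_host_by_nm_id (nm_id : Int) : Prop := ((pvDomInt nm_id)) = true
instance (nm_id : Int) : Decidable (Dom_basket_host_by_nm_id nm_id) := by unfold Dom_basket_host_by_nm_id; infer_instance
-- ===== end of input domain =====

-- B replaces A's linear early-break scan by a binary search (bisect_left) over the sorted bounds; faster by a constant factor.

-- ===== PORT A =====
def VOL_HOST_BREAKPOINTS : List (Int × String) :=
  [(143, "01"), (287, "02"), (431, "03"), (719, "04"), (1007, "05"), (1061, "06"),
   (1115, "07"), (1169, "08"), (1313, "09"), (1601, "10"), (1655, "11"), (1919, "12"),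
   (2045, "13"), (2189, "14"), (2405, "15"), (2621, "16"), (2837, "17"), (3053, "18"),
   (3269, "19"), (3485, "20"), (3701, "21"), (3917, "22"), (4133, "23"), (4349, "24"),
   (4565, "25"), (4877, "26"), (5189, "27"), (5501, "28"), (5813, "29"), (6125, "30"),
   (6437, "31"), (6749, "32"), (7061, "33"), (7373, "34"), (7685, "35"), (7997, "36"),
   (8309, "37"), (8741, "38"), (9173, "39"), (9605, "40")]

-- A's for-loop with break: first pair whose upper_bound ≥ vol sets shard; default "41".
def scanShard (vol : Int) : List (Int × String) → String
  | [] => "41"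
  | (upper_bound, bucket) :: rest =>
      if vol ≤ upper_bound then bucket else scanShard vol rest

def basket_host_by_nm_id (nm_id : Int) : String :=
  let vol := PySem.Int.floordiv nm_id 100000
  let shard := scanShard vol VOL_HOST_BREAKPOINTS
  "basket-" ++ shard ++ ".wbbasket.ru/vol" ++ PySem.Int.toStr vol

-- ===== PORT B =====
def pvBounds : List Int :=
  [143, 287, 431, 719, 1007, 1061, 1115, 1169, 1313, 1601, 1655, 1919, 2045, 2189,
   2405, 2621, 2837, 3053, 3269, 3485, 3701, 3917, 4133, 4349, 4565, 4877, 5189,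
   5501, 5813, 6125, 6437, 6749, 7061, 7373, 7685, 7997, 8309, 8741, 9173, 9605]

def pvShards : List String :=
  ["01", "02", "03", "04", "05", "06", "07", "08", "09", "10", "11", "12", "13",
   "14", "15", "16", "17", "18", "19", "20", "21", "22", "23", "24", "25", "26",
   "27", "28", "29", "30", "31", "32", "33", "34", "35", "36", "37", "38", "39", "40"]

-- Source B's while-loop bisect_left; recursion on hi - lo.
def bisectLeft (bounds : List Int) (x : Int) (lo hi : Nat) : Nat :=
  if _h : lo < hi then
    let mid := (lo + hi) / 2
    if bounds.getD mid 0 < x then bisectLeft bounds x (mid + 1) hi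
    else bisectLeft bounds x lo mid
  else lo
termination_by hi - lo
decreasing_by all_goals omega

def basket_host_by_nm_id_alt (nm_id : Int) : String :=
  let vol := PySem.Int.floordiv nm_id 100000
  let lo := bisectLeft pvBounds vol 0 pvBounds.length
  let shard := if lo < pvBounds.length then pvShards.getD lo "41" else "41"
  "basket-" ++ shard ++ ".wbbasket.ru/vol" ++ PySem.Int.toStr vol

-- ===== PRECONDITION & SPEC =====
def Spec_basket_host_by_nm_id (nm_id : Int) (out : String) : Prop := out = basket_host_by_nm_id_alt nm_id
instance (nm_id : Int) (out : String) : Decidable (Spec_basket_host_by_nm_id nm_id out) := by unfold Spec_basket_host_by_nm_id; infer_instance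

-- ===== CLAIM (what is proved, stated in full; the proofs are below) =====
def Claim_equal_basket_host_by_nm_id : Prop := ∀ (nm_id : Int), Dom_basket_host_by_nm_id nm_id → Spec_basket_host_by_nm_id nm_id (basket_host_by_nm_id nm_id)

-- ===== LEMMAS AND PROOFS =====

-- the tables of B are the two projections of A's table
theorem bounds_eq_map : pvBounds = VOL_HOST_BREAKPOINTS.map Prod.fst := by decide
theorem shards_eq_map : pvShards = VOL_HOST_BREAKPOINTS.map Prod.snd := by decide
theorem bounds_sorted : List.Pairwise (· ≤ ·) pvBounds := by decide

-- bisectLeft returns a least-upper-bound index: everything before it is < x,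
-- and the element at it (if any) is ≥ x.  Induction on the fuel n ≥ hi - lo.
theorem bisect_spec_aux (bounds : List Int) (x : Int)
    (hsort : List.Pairwise (· ≤ ·) bounds) :
    ∀ (n lo hi : Nat), hi - lo ≤ n → hi ≤ bounds.length → lo ≤ hi →
    (∀ j, j < lo → bounds.getD j 0 < x) →
    (∀ j, hi ≤ j → j < bounds.length → x ≤ bounds.getD j 0) →
    bisectLeft bounds x lo hi ≤ bounds.length ∧
    (∀ j, j < bisectLeft bounds x lo hi → bounds.getD j 0 < x) ∧
    (bisectLeft bounds x lo hi < bounds.length →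
      x ≤ bounds.getD (bisectLeft bounds x lo hi) 0) := by
  have hmono : ∀ i j : Nat, i ≤ j → j < bounds.length →
      bounds.getD i 0 ≤ bounds.getD j 0 := by
    intro i j hij hj
    rcases Nat.eq_or_lt_of_le hij with rfl | hij'
    · exact le_refl _
    · have hi : i < bounds.length := Nat.lt_trans hij' hj
      rw [List.getD_eq_getElem bounds 0 hi, List.getD_eq_getElem bounds 0 hj]
      exact (List.pairwise_iff_getElem.mp hsort) i j hi hj hij'
  intro n
  induction n with
  | zero =>
    intro lo hi hn hhi hlohi hlow hhigh
    have : ¬ lo < hi := by omega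
    rw [bisectLeft]
    simp only [dif_neg this]
    exact ⟨by omega, hlow, fun hlt => hhigh lo (by omega) hlt⟩
  | succ n ih =>
    intro lo hi hn hhi hlohi hlow hhigh
    rw [bisectLeft]
    by_cases h : lo < hi
    · simp only [dif_pos h]
      set mid := (lo + hi) / 2 with hmid
      have hmlt : mid < hi := by omega
      have hmlo : lo ≤ mid := by omega
      by_cases hc : bounds.getD mid 0 < x
      · rw [if_pos hc]
        exact ih (mid + 1) hi (by omega) hhi (by omega)
          (fun j hj => lt_of_le_of_lt (hmono j mid (by omega) (by omega)) hc)
          hhigh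
      · rw [if_neg hc]
        exact ih lo mid (by omega) (by omega) (by omega) hlow
          (fun j hj hjlen => le_trans (not_lt.mp hc) (hmono mid j hj hjlen))
    · simp only [dif_neg h]
      exact ⟨by omega, hlow, fun hlt => hhigh lo (by omega) hlt⟩

-- A's scan returns the bucket at any index i whose prefix is all < vol and whose
-- entry (if in range) is ≥ vol.
theorem scan_spec (vol : Int) :
    ∀ (ps : List (Int × String)) (i : Nat), i ≤ ps.length →
    (∀ j, j < i → (ps.getD j (0, "")).1 < vol) →
    (i < ps.length → vol ≤ (ps.getD i (0, "")).1) →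
    scanShard vol ps = if i < ps.length then (ps.getD i (0, "")).2 else "41" := by
  intro ps
  induction ps with
  | nil =>
    intro i hi _ _
    simp only [scanShard, List.length_nil]
    rw [if_neg (by omega)]
  | cons p rest ih =>
    intro i hi hlow hhigh
    cases i with
    | zero =>
      have hlt : 0 < (p :: rest).length := by simp
      have hvp : vol ≤ p.1 := by simpa using hhigh hlt
      rw [if_pos hlt]
      simp only [List.getD_cons_zero]
      simp [scanShard, hvp]
    | succ k =>
      have hp : p.1 < vol := by simpa using hlow 0 (Nat.succ_pos k)
      have hrec := ih k (by simpa using hi)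
        (fun j hj => by simpa using hlow (j + 1) (by omega))
        (fun hk => by simpa using hhigh (by simpa using hk))
      simp only [scanShard, if_neg (not_le.mpr hp)]
      rw [hrec]
      simp only [List.length_cons, List.getD_cons_succ]
      by_cases hk : k < rest.length
      · rw [if_pos hk, if_pos (by omega)]
      · rw [if_neg hk, if_neg (by omega)]

-- getD through the two map projections
theorem getD_fst (j : Nat) (hj : j < VOL_HOST_BREAKPOINTS.length) :
    (VOL_HOST_BREAKPOINTS.map Prod.fst).getD j 0 =
      (VOL_HOST_BREAKPOINTS.getD j (0, "")).1 := by
  rw [List.getD_eq_getElem _ 0 (by simpa using hj), List.getD_eq_getElem _ _ hj]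
  simp

theorem getD_snd (j : Nat) (hj : j < VOL_HOST_BREAKPOINTS.length) :
    (VOL_HOST_BREAKPOINTS.map Prod.snd).getD j "41" =
      (VOL_HOST_BREAKPOINTS.getD j (0, "")).2 := by
  rw [List.getD_eq_getElem _ _ (by simpa using hj), List.getD_eq_getElem _ _ hj]
  simp

-- the two shard lookups agree for every vol
theorem shard_eq (vol : Int) :
    scanShard vol VOL_HOST_BREAKPOINTS =
      (if bisectLeft pvBounds vol 0 pvBounds.length < pvBounds.length
       then pvShards.getD (bisectLeft pvBounds vol 0 pvBounds.length) "41" else "41") := by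
  have hlen : pvBounds.length = VOL_HOST_BREAKPOINTS.length := by decide
  obtain ⟨h1, h2, h3⟩ := bisect_spec_aux pvBounds vol bounds_sorted pvBounds.length 0
    pvBounds.length (by omega) (le_refl _) (Nat.zero_le _) (by omega) (by omega)
  set r := bisectLeft pvBounds vol 0 pvBounds.length with hr
  have hscan := scan_spec vol VOL_HOST_BREAKPOINTS r (hlen ▸ h1)
    (fun j hj => by
      have := h2 j hj
      rwa [bounds_eq_map, getD_fst j (by have := h1; omega)] at this)
    (fun hrlt => by
      have := h3 (by omega)
      rwa [bounds_eq_map, getD_fst r (by omega)] at this)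
  rw [hscan, hlen]
  split_ifs with h
  · rw [shards_eq_map, getD_snd r (by omega)]
  · rfl

-- ===== VERDICT (by name: the statement is the Claim_ definition above) =====
theorem basket_host_by_nm_id_spec : Claim_equal_basket_host_by_nm_id := by
  intro nm_id _
  unfold Spec_basket_host_by_nm_id basket_host_by_nm_id basket_host_by_nm_id_alt
  simp only []
  rw [shard_eq]
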